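-- pv_equiv track=rewrite | github.com/nosuggest/LeetCode | LeetCode/LeetCode903valid-permutations-for-di-sequence.py | numPermsDISequence
-- ===== SOURCE A (Python) =====
-- from functools import lru_cache
--
-- def numPermsDISequence(S):
--     """
--     :type S: str
--     :rtype: int
--     """
--     length = len(S)
--     MOD = 10 ** 9 + 7
--
--     @lru_cache(None)
--     def dp(i, j):
--         if i == 0:
--             return 1
--         elif S[i - 1] == "D":
--             return sum(dp(i - 1, k) for k in range(j, i)) % MOD
--         else:
--             return sum(dp(i - 1, k) for k in range(j)) % MOD
--
--     return sum(dp(length, k) for k in range(length + 1)) % MOD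
-- ===== SOURCE B (Python) =====
-- def numPermsDISequence(S):
--     MOD = 10 ** 9 + 7
--     dp = [1]
--     for i, c in enumerate(S, 1):
--         pre = [0]
--         for v in dp:
--             pre.append(pre[-1] + v)
--         if c == "D":
--             dp = [(pre[i] - pre[j]) % MOD for j in range(i + 1)]
--         else:
--             dp = [pre[j] % MOD for j in range(i + 1)]
--     return sum(dp) % MOD
-- ===== Notes on version B (the rewrite author's own statement) =====
-- stated objective: faster
-- what changed: Replaces A's memoized recursion with O(n) sums per cell by an iterative bottom-up DP that builds one exact prefix-sum array per row, making each transition O(1): O(n^3) -> O(n^2).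
import Mathlib
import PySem

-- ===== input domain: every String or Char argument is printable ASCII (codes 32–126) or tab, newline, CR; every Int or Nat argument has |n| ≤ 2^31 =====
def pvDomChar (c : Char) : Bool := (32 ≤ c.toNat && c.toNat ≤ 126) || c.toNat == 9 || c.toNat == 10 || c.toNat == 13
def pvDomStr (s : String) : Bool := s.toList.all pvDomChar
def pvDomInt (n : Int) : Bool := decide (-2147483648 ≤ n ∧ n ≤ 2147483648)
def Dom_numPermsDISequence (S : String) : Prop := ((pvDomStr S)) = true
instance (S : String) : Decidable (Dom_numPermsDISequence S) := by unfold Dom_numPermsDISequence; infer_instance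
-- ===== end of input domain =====

-- B replaces A's memoized O(n) inner sums by one pass of exact prefix sums per DP row
-- (iterative bottom-up DP): an asymptotic change from O(n^3) to O(n^2) additions.

-- ===== PORT A =====
-- dp(i, j) of A's memoized recursion; recursion on i only, as in A.
-- A's S[i-1] is always in range on reachable calls (1 ≤ i ≤ len(S)), so getD is exact here.
def dpA (s : List Char) : Nat → Nat → Int
  | 0 => fun _ => (1 : Int)
  | i + 1 => fun j =>
    if s.getD i ' ' = 'D' then
      PySem.Int.mod (((List.range' j (i + 1 - j)).map (dpA s i)).sum) 1000000007
    else
      PySem.Int.mod (((List.range j).map (dpA s i)).sum) 1000000007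

def numPermsDISequence (S : String) : Int :=
  let length := S.toList.length
  PySem.Int.mod (((List.range (length + 1)).map (dpA S.toList length)).sum) 1000000007

-- ===== PORT B =====
-- one enumerate step of Source B's loop: build exact prefix sums of the previous row, then the new row.
-- pre[-1] is the last element of the (always nonempty) pre list, so getLastD is exact.
def bStep (dp : List Int) (ci : Char × Nat) : List Int :=
  let i := ci.2
  let pre : List Int := dp.foldl (fun a v => a ++ [a.getLastD 0 + v]) [0]
  if ci.1 = 'D' then
    (List.range (i + 1)).map (fun j => PySem.Int.mod (pre.getD i 0 - pre.getD j 0) 1000000007)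
  else
    (List.range (i + 1)).map (fun j => PySem.Int.mod (pre.getD j 0) 1000000007)

def numPermsDISequence_alt (S : String) : Int :=
  let dp := (S.toList.zipIdx 1).foldl bStep [1]
  PySem.Int.mod dp.sum 1000000007

-- ===== PRECONDITION & SPEC =====
def Spec_numPermsDISequence (S : String) (out : Int) : Prop := out = numPermsDISequence_alt S
instance (S : String) (out : Int) : Decidable (Spec_numPermsDISequence S out) := by unfold Spec_numPermsDISequence; infer_instance

-- ===== CLAIM (what is proved, stated in full; the proofs are below) =====
def Claim_equal_numPermsDISequence : Prop := ∀ (S : String), Dom_numPermsDISequence S → Spec_numPermsDISequence S (numPermsDISequence S)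

-- ===== LEMMAS AND PROOFS =====

-- row i of A's DP table
def rowA (s : List Char) (i : Nat) : List Int := (List.range (i + 1)).map (dpA s i)

-- the prefix-sum fold of bStep, characterised
theorem pre_fold (xs : List Int) : ∀ (acc : List Int), acc ≠ [] →
    xs.foldl (fun a v => a ++ [a.getLastD 0 + v]) acc
      = acc ++ (List.range xs.length).map (fun j => acc.getLastD 0 + ((xs.take (j + 1)).sum)) := by
  induction xs with
  | nil => intro acc _; simp
  | cons v xs ih =>
    intro acc hacc
    have hne : acc ++ [acc.getLastD 0 + v] ≠ [] := by simp
    simp only [List.foldl_cons, ih _ hne]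
    rw [List.length_cons, List.range_succ_eq_map]
    simp [List.append_assoc, Function.comp, add_assoc]

theorem pre_getD (xs : List Int) (j : Nat) (hj : j ≤ xs.length) :
    (xs.foldl (fun a v => a ++ [a.getLastD 0 + v]) [0]).getD j 0 = (xs.take j).sum := by
  rw [pre_fold xs [0] (by simp)]
  cases j with
  | zero => simp
  | succ k =>
    have hk : k < xs.length := by omega
    simp [List.getD, List.getElem?_map, List.getElem?_range hk]

-- the sum over range' j (m - j) is the difference of two prefix sums of the row
theorem sum_range'_eq (f : Nat → Int) (j m : Nat) (hj : j ≤ m) :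
    ((List.range' j (m - j)).map f).sum
      = ((List.range m).map f).sum - ((List.range j).map f).sum := by
  have h : List.range m = List.range j ++ List.range' j (m - j) := by
    conv_lhs => rw [show m = j + (m - j) by omega]
    rw [List.range_add, List.range'_eq_map_range]
  rw [h, List.map_append, List.sum_append]
  ring

theorem take_rowA (s : List Char) (i j : Nat) (hj : j ≤ i + 1) :
    ((rowA s i).take j).sum = ((List.range j).map (dpA s i)).sum := by
  rw [rowA, ← List.map_take, List.take_range, Nat.min_eq_left hj]

theorem step_row (s : List Char) (i : Nat) (c : Char) (hc : s.getD i ' ' = c) :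
    bStep (rowA s i) (c, i + 1) = rowA s (i + 1) := by
  rw [List.getD_eq_getElem?_getD] at hc
  have hlen : (rowA s i).length = i + 1 := by simp [rowA]
  have hpre : ∀ j, j ≤ i + 1 →
      ((rowA s i).foldl (fun a v => a ++ [a.getLastD 0 + v]) [0]).getD j 0
        = ((List.range j).map (dpA s i)).sum := by
    intro j hj
    rw [pre_getD _ j (by omega), take_rowA s i j hj]
  show bStep (rowA s i) (c, i + 1) = rowA s (i + 1)
  simp only [bStep, rowA]
  rw [← rowA]
  split_ifs with hD
  all_goals
    apply List.map_congr_left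
    intro j hj
    have hj2 : j ≤ i + 1 := by
      have := List.mem_range.mp hj; omega
  · rw [hpre (i + 1) (by omega), hpre j hj2, ← sum_range'_eq (dpA s i) j (i + 1) hj2]
    simp [dpA, hc, hD]
  · rw [hpre j hj2]
    simp [dpA, hc, hD]

theorem fold_rows (s : List Char) : ∀ (t : List Char) (i : Nat), t = s.drop i →
    (t.zipIdx (i + 1)).foldl bStep (rowA s i) = rowA s (i + t.length) := by
  intro t
  induction t with
  | nil => intro i _; simp
  | cons c t ih =>
    intro i ht
    have hget : s.getD i ' ' = c := by
      have h := congrArg List.head? ht.symm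
      rw [List.head?_drop] at h
      simp only [List.head?_cons] at h
      simp [List.getD, h]
    have ht' : t = s.drop (i + 1) := by
      have h := congrArg List.tail ht.symm
      rw [List.tail_drop] at h
      simpa using h.symm
    rw [List.zipIdx_cons, List.foldl_cons, step_row s i c hget, ih (i + 1) ht']
    congr 1
    simp; omega

theorem rows_eq (s : List Char) :
    (s.zipIdx 1).foldl bStep [1] = rowA s s.length := by
  have h0 : rowA s 0 = [1] := by simp [rowA, dpA]
  rw [← h0, fold_rows s s 0 (by simp), Nat.zero_add]

-- ===== VERDICT (by name: the statement is the Claim_ definition above) =====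
theorem numPermsDISequence_spec : Claim_equal_numPermsDISequence := by
  intro S _
  show numPermsDISequence S = numPermsDISequence_alt S
  unfold numPermsDISequence numPermsDISequence_alt
  rw [rows_eq S.toList]
  rfl
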